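-- pv_equiv track=rewrite | github.com/hortune/cns2017 | hw3/problem8/reverse.py | unBitshiftRightXor
-- ===== SOURCE A (Python) =====
-- L = 32
--
-- def unBitshiftRightXor(value, shift, mask):
--         i = 0
--         result = 0
--         shiftmask = 2**shift - 1
--         while (i * shift) < L:
--                 partmask = (shiftmask << (L - shift)) >> (shift * i)
--                 part = value & partmask
--                 value ^= (part >> shift) & mask
--                 result |= part
--                 i += 1
--         return result
-- ===== SOURCE B (Python) =====
-- L = 32
--
-- def unBitshiftRightXor(value, shift, mask):
--         # bit-by-bit recovery from the MSB down instead of shift-sized blocks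
--         result = 0
--         for j in range(L - 1, -1, -1):
--                 yj = (value >> j) & 1
--                 hb = (result >> (j + shift)) & 1 if j + shift < L else 0
--                 xj = yj ^ (((mask >> j) & 1) & hb)
--                 result |= xj << j
--         return result
-- ===== Notes on version B (the rewrite author's own statement) =====
-- stated objective: alternative
-- what changed: B inverts y = x ^ ((x>>shift)&mask) by recovering one bit per iteration from the MSB down (a fixed 32-step single-bit loop reading already-recovered higher bits) instead of A's while loop that recovers shift-sized blocks with masked block extraction and value re-xoring.
import Mathlib
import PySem

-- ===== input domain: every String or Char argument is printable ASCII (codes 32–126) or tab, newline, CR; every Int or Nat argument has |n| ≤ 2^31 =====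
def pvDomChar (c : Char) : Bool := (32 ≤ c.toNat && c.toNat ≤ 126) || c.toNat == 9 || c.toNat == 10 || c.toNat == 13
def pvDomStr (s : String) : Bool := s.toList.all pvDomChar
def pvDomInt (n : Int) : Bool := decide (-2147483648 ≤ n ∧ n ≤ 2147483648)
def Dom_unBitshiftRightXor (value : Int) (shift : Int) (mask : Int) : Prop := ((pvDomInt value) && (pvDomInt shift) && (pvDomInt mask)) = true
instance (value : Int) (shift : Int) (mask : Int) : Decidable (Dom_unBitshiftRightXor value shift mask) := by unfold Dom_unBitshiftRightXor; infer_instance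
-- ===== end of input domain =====

-- B recovers x bit-by-bit from the MSB down (32 single-bit steps) instead of A's
-- shift-sized block loop; objective: alternative decomposition, same exact result.

-- ===== PORT A =====
-- while loop ported with fuel 33: under Pre_ (1 ≤ shift) the Python loop exits after
-- at most 32 iterations, so the fuel is never exhausted inside Pre_.
-- `.toNat` on the shift amounts is exact under Pre_ (1 ≤ shift ≤ 32 keeps them ≥ 0).
def pvAloop (shift mask shiftmask : Int) : Nat → Int → Int → Int → Int
  | 0, _i, _value, result => result
  | fuel+1, i, value, result =>
    if i * shift < 32 then
      let partmask := (shiftmask <<< (32 - shift).toNat) >>> (shift * i).toNat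
      let part := PySem.Int.band value partmask
      let value' := PySem.Int.bxor value (PySem.Int.band (part >>> shift.toNat) mask)
      let result' := PySem.Int.bor result part
      pvAloop shift mask shiftmask fuel (i + 1) value' result'
    else result

def unBitshiftRightXor (value : Int) (shift : Int) (mask : Int) : Int :=
  pvAloop shift mask ((2 : Int) ^ shift.toNat - 1) 33 0 value 0

-- ===== PORT B =====
-- one iteration of B's `for j in range(L-1, -1, -1)` body at bit j
def pvBstep (value shift mask result : Int) (j : Nat) : Int :=
  let yj := PySem.Int.band (value >>> j) 1
  let hb := if (j : Int) + shift < 32 then PySem.Int.band (result >>> ((j : Int) + shift).toNat) 1 else 0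
  let xj := PySem.Int.bxor yj (PySem.Int.band (PySem.Int.band (mask >>> j) 1) hb)
  PySem.Int.bor result (xj <<< j)

-- countdown loop: `pvBloop … n r` still has to process bits n-1, …, 0
def pvBloop (value shift mask : Int) : Nat → Int → Int
  | 0, result => result
  | n+1, result => pvBloop value shift mask n (pvBstep value shift mask result n)

def unBitshiftRightXor_alt (value : Int) (shift : Int) (mask : Int) : Int :=
  pvBloop value shift mask 32 0

-- ===== PRECONDITION & SPEC =====
-- Pre_ excludes shift ≤ 0 (the Python A loops forever at shift = 0 and raises
-- TypeError for shift < 0) and shift ≥ 33 (A raises ValueError: negative shift count).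
def Pre_unBitshiftRightXor (value : Int) (shift : Int) (mask : Int) : Prop :=
  1 ≤ shift ∧ shift ≤ 32
instance (value : Int) (shift : Int) (mask : Int) : Decidable (Pre_unBitshiftRightXor value shift mask) := by unfold Pre_unBitshiftRightXor; infer_instance

def pvWitness_unBitshiftRightXor : Int × Int × Int := (5, 2, 3)

def Spec_unBitshiftRightXor (value : Int) (shift : Int) (mask : Int) (out : Int) : Prop := out = unBitshiftRightXor_alt value shift mask
instance (value : Int) (shift : Int) (mask : Int) (out : Int) : Decidable (Spec_unBitshiftRightXor value shift mask out) := by unfold Spec_unBitshiftRightXor; infer_instance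

-- ===== CLAIM (what is proved, stated in full; the proofs are below) =====
def Claim_equal_unBitshiftRightXor : Prop := ∀ (value : Int) (shift : Int) (mask : Int), Dom_unBitshiftRightXor value shift mask → Pre_unBitshiftRightXor value shift mask → Spec_unBitshiftRightXor value shift mask (unBitshiftRightXor value shift mask)


-- ===== LEMMAS AND PROOFS =====

theorem pv_ldiff_zero_left (n : Nat) : Nat.ldiff 0 n = 0 := by
  apply Nat.eq_of_testBit_eq; intro i; simp [Nat.testBit_ldiff]

theorem pv_sub_and_eq_ldiff : ∀ m n : Nat, m - (m &&& n) = m.ldiff n := by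
  intro m
  induction m using Nat.binaryRec with
  | zero => simp [pv_ldiff_zero_left]
  | bit b m ih =>
    intro n
    cases n using Nat.bitCasesOn with
    | bit b' n =>
      rw [Nat.land_bit, Nat.ldiff_bit]
      have h1 := ih n
      have h2 : m &&& n ≤ m := Nat.and_le_left
      simp only [Nat.bit_val]
      cases b <;> cases b' <;> simp <;> omega

theorem pv_band_eq_land (a b : Int) : PySem.Int.band a b = Int.land a b := by
  unfold PySem.Int.band Int.land
  rcases a with m | m <;> rcases b with n | n <;>
    simp [Int.negSucc_eq, pv_sub_and_eq_ldiff] <;> omega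

theorem pv_bor_eq_lor (a b : Int) : PySem.Int.bor a b = Int.lor a b := by
  unfold PySem.Int.bor Int.lor
  rcases a with m | m <;> rcases b with n | n <;>
    simp [Int.negSucc_eq, pv_sub_and_eq_ldiff] <;> omega

theorem pv_bxor_eq_xor (a b : Int) : PySem.Int.bxor a b = Int.xor a b := by
  unfold PySem.Int.bxor Int.xor
  rcases a with m | m <;> rcases b with n | n <;>
    simp [Int.negSucc_eq] <;> omega

theorem pv_tb_band (a b : Int) (k : Nat) : (PySem.Int.band a b).testBit k = (a.testBit k && b.testBit k) := by
  rw [pv_band_eq_land, Int.testBit_land]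

theorem pv_tb_bor (a b : Int) (k : Nat) : (PySem.Int.bor a b).testBit k = (a.testBit k || b.testBit k) := by
  rw [pv_bor_eq_lor, Int.testBit_lor]

theorem pv_tb_bxor (a b : Int) (k : Nat) : (PySem.Int.bxor a b).testBit k = (a.testBit k ^^ b.testBit k) := by
  rw [pv_bxor_eq_xor, Int.testBit_lxor]

theorem pv_tb_shr (a : Int) (n k : Nat) : (a >>> n).testBit k = a.testBit (n + k) := by
  rcases a with m | m <;>
    simp only [HShiftRight.hShiftRight, Int.shiftRight, Int.testBit] <;>
    rw [show ShiftRight.shiftRight m n = m >>> n from rfl, Nat.testBit_shiftRight]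

theorem pv_tb_shl_nonneg (a : Int) (ha : 0 ≤ a) (n k : Nat) :
    (a <<< n).testBit k = (decide (n ≤ k) && a.testBit (k - n)) := by
  obtain ⟨m, rfl⟩ := Int.eq_ofNat_of_zero_le ha
  simp only [HShiftLeft.hShiftLeft, Int.shiftLeft, Int.testBit]
  rw [show ShiftLeft.shiftLeft m n = m <<< n from rfl, Nat.testBit_shiftLeft]

theorem pv_tb_natCast (n : Nat) (k : Nat) : ((n : Int)).testBit k = n.testBit k := rfl

theorem pv_tb_zero (k : Nat) : (0 : Int).testBit k = false := by
  simpa using pv_tb_natCast 0 k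

theorem pv_tb_one (k : Nat) : (1 : Int).testBit k = decide (k = 0) := by
  have h := pv_tb_natCast 1 k
  simp only [Nat.cast_one] at h
  rw [h]
  have : (1 : Nat) = 2 ^ 1 - 1 := rfl
  rw [this, Nat.testBit_two_pow_sub_one]
  by_cases hk : k = 0 <;> simp [hk] <;> omega

theorem pv_tb_two_pow_sub_one (s k : Nat) : ((2 : Int) ^ s - 1).testBit k = decide (k < s) := by
  have h : ((2 : Int) ^ s - 1) = ((2 ^ s - 1 : Nat) : Int) := by
    have : (1:Nat) ≤ 2 ^ s := Nat.one_le_two_pow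
    push_cast [this]
    ring
  rw [h, pv_tb_natCast, Nat.testBit_two_pow_sub_one]

theorem pv_shr_nonneg (a : Int) (ha : 0 ≤ a) (n : Nat) : 0 ≤ a >>> n := by
  obtain ⟨m, rfl⟩ := Int.eq_ofNat_of_zero_le ha
  exact Int.natCast_nonneg _

theorem pv_shl_nonneg (a : Int) (ha : 0 ≤ a) (n : Nat) : 0 ≤ a <<< n := by
  obtain ⟨m, rfl⟩ := Int.eq_ofNat_of_zero_le ha
  exact Int.natCast_nonneg _

theorem pv_bor_nonneg (a b : Int) (ha : 0 ≤ a) (hb : 0 ≤ b) : 0 ≤ PySem.Int.bor a b := by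
  obtain ⟨m, rfl⟩ := Int.eq_ofNat_of_zero_le ha
  obtain ⟨n, rfl⟩ := Int.eq_ofNat_of_zero_le hb
  rw [pv_bor_eq_lor]
  exact Int.natCast_nonneg _

theorem pv_bxor_nonneg (a b : Int) (ha : 0 ≤ a) (hb : 0 ≤ b) : 0 ≤ PySem.Int.bxor a b := by
  obtain ⟨m, rfl⟩ := Int.eq_ofNat_of_zero_le ha
  obtain ⟨n, rfl⟩ := Int.eq_ofNat_of_zero_le hb
  rw [pv_bxor_eq_xor]
  exact Int.natCast_nonneg _

theorem pv_band_nonneg (a b : Int) (ha : 0 ≤ a) : 0 ≤ PySem.Int.band a b :=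
  PySem.Int.band_nonneg_of_nonneg_left b ha

theorem pv_eq_of_tb (a b : Int) (ha : 0 ≤ a) (hb : 0 ≤ b)
    (h : ∀ k, a.testBit k = b.testBit k) : a = b := by
  obtain ⟨m, rfl⟩ := Int.eq_ofNat_of_zero_le ha
  obtain ⟨n, rfl⟩ := Int.eq_ofNat_of_zero_le hb
  have : m = n := Nat.eq_of_testBit_eq fun i => h i
  rw [this]

-- the intended inverse, bit k recovered from bits k+t+1 (shift = t+1) upward
def pvX (y m : Int) (t : Nat) (k : Nat) : Bool :=
  if 32 ≤ k then false
  else xor (y.testBit k) (m.testBit k && pvX y m t (k + t + 1))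
termination_by 32 - k
decreasing_by omega

theorem pvX_high (y m : Int) (t : Nat) (k : Nat) (h : 32 ≤ k) : pvX y m t k = false := by
  rw [pvX]; simp [h]

theorem pvX_low (y m : Int) (t : Nat) (k : Nat) (h : k < 32) :
    pvX y m t k = xor (y.testBit k) (m.testBit k && pvX y m t (k + t + 1)) := by
  rw [pvX]; simp [Nat.not_le.mpr h]

theorem pv_band_nonneg_right (a b : Int) (hb : 0 ≤ b) : 0 ≤ PySem.Int.band a b := by
  rw [PySem.Int.band_comm]; exact pv_band_nonneg _ _ hb

theorem pvBstep_nonneg (y sh m r : Int) (n : Nat) (hr : 0 ≤ r) :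
    0 ≤ pvBstep y sh m r n := by
  unfold pvBstep
  refine pv_bor_nonneg _ _ hr (pv_shl_nonneg _ ?_ _)
  refine pv_bxor_nonneg _ _ (pv_band_nonneg_right _ _ one_pos.le) (pv_band_nonneg _ _ ?_)
  exact pv_band_nonneg_right _ _ one_pos.le

theorem pvBstep_tb (y m r : Int) (t n : Nat) (hr : 0 ≤ r) (k : Nat) :
    (pvBstep y ((t : Int) + 1) m r n).testBit k =
      (r.testBit k ||
        (decide (k = n) &&
          xor (y.testBit n) (m.testBit n && (if n + t + 1 < 32 then r.testBit (n + t + 1) else false)))) := by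
  have hcond : ((n : Int) + ((t : Int) + 1) < 32) ↔ (n + t + 1 < 32) := by omega
  have htn : ((n : Int) + ((t : Int) + 1)).toNat = n + t + 1 := by omega
  have hxj : 0 ≤ PySem.Int.bxor (PySem.Int.band (y >>> n) 1)
      (PySem.Int.band (PySem.Int.band (m >>> n) 1)
        (if (n : Int) + ((t : Int) + 1) < 32 then
          PySem.Int.band (r >>> ((n : Int) + ((t : Int) + 1)).toNat) 1 else 0)) := by
    exact pv_bxor_nonneg _ _ (pv_band_nonneg_right _ _ one_pos.le)
      (pv_band_nonneg _ _ (pv_band_nonneg_right _ _ one_pos.le))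
  simp only [pvBstep]
  rw [pv_tb_bor, pv_tb_shl_nonneg _ hxj]
  congr 1
  by_cases hc : n + t + 1 < 32 <;>
    [rw [if_pos (hcond.mpr hc)]; rw [if_neg (fun h => hc (hcond.mp h))]] <;>
  simp only [htn, pv_tb_bxor, pv_tb_band, pv_tb_shr, pv_tb_one, pv_tb_zero, hc,
    if_true, if_false] <;>
  by_cases hk : k = n
  · subst hk; simp
  · by_cases hkn : n ≤ k
    · have hi : (k - n = 0) = False := by simp; omega
      simp [hk, hi]
    · simp [hk, hkn]
  · subst hk; simp
  · by_cases hkn : n ≤ k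
    · have hi : (k - n = 0) = False := by simp; omega
      simp [hk, hi]
    · simp [hk, hkn]

theorem pvB_inv (y m : Int) (t : Nat) :
    ∀ n : Nat, n ≤ 32 → ∀ r : Int, 0 ≤ r →
    (∀ k : Nat, r.testBit k = (decide (n ≤ k) && pvX y m t k)) →
    0 ≤ pvBloop y ((t : Int) + 1) m n r ∧
      ∀ k : Nat, (pvBloop y ((t : Int) + 1) m n r).testBit k = pvX y m t k := by
  intro n
  induction n with
  | zero =>
    intro _ r hr h
    exact ⟨hr, fun k => by simpa using h k⟩
  | succ n ih =>
    intro hn r hr h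
    rw [pvBloop]
    apply ih (by omega) _ (pvBstep_nonneg y _ m r n hr)
    intro k
    rw [pvBstep_tb y m r t n hr k, h k]
    by_cases hk : k = n
    · rw [hk]
      have h32 : n < 32 := by omega
      have hns : ¬ (n + 1 ≤ n) := by omega
      rw [pvX_low y m t n h32]
      have hhb : (if n + t + 1 < 32 then r.testBit (n + t + 1) else false) = pvX y m t (n + t + 1) := by
        by_cases hc : n + t + 1 < 32
        · rw [if_pos hc, h (n + t + 1)]
          simp [show n + 1 ≤ n + t + 1 by omega]
        · rw [if_neg hc, pvX_high y m t _ (by omega)]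
      rw [hhb]
      simp [hns]
    · by_cases hkn : n + 1 ≤ k
      · simp [hk, show n ≤ k by omega, hkn]
      · simp [hk, show ¬ n ≤ k by omega, hkn]

theorem pv_partmask_tb (t iN : Nat) (ht : t + 1 ≤ 32) (k : Nat) :
    (((((2:Int)^(t+1) - 1) <<< (((32:Int) - ((t:Int)+1)).toNat)) >>> ((((t:Int)+1) * (iN:Int)).toNat))).testBit k
      = decide ((32:Int) - ((t:Int)+1) * ((iN:Int)+1) ≤ (k:Int) ∧ (k:Int) < 32 - ((t:Int)+1) * (iN:Int)) := by
  have hsm : (0:Int) ≤ (2:Int)^(t+1) - 1 := by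
    have : (1:Int) ≤ 2^(t+1) := one_le_pow₀ (by norm_num)
    omega
  have h1 : ((32:Int) - ((t:Int)+1)).toNat = 32 - (t+1) := by omega
  have h2 : (((t:Int)+1) * (iN:Int)).toNat = (t+1) * iN := by
    rw [show ((t:Int)+1) * (iN:Int) = (((t+1) * iN : Nat) : Int) by push_cast; ring, Int.toNat_natCast]
  rw [h1, h2, pv_tb_shr, pv_tb_shl_nonneg _ hsm, pv_tb_two_pow_sub_one, ← Bool.decide_and]
  have e1 : ((t:Int)+1) * ((iN:Int)+1) = (((t+1) * iN : Nat) : Int) + ((t:Int)+1) := by push_cast; ring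
  have e2 : ((t:Int)+1) * ((iN:Int)) = (((t+1) * iN : Nat) : Int) := by push_cast; ring
  rw [e1, e2, decide_eq_decide]
  generalize (t+1) * iN = j
  omega

theorem pvA_inv (y m : Int) (t : Nat) (ht : t + 1 ≤ 32) :
    ∀ fuel iN : Nat, 32 ≤ iN + fuel → ∀ value r : Int, 0 ≤ r →
    (∀ k : Nat, r.testBit k = (decide ((32:Int) - ((t:Int)+1) * (iN:Int) ≤ (k:Int)) && pvX y m t k)) →
    (∀ k : Nat, (k:Int) < 32 - ((t:Int)+1) * (iN:Int) →
      value.testBit k = (if (32:Int) - ((t:Int)+1) * ((iN:Int)+1) ≤ (k:Int) then pvX y m t k else y.testBit k)) →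
    0 ≤ pvAloop ((t:Int)+1) m ((2:Int)^(t+1) - 1) fuel (iN:Int) value r ∧
      ∀ k : Nat, (pvAloop ((t:Int)+1) m ((2:Int)^(t+1) - 1) fuel (iN:Int) value r).testBit k = pvX y m t k := by
  intro fuel
  induction fuel with
  | zero =>
    intro iN hfuel value r hr hres _hval
    rw [pvAloop]
    refine ⟨hr, fun k => ?_⟩
    rw [hres k]
    have hbig : (32:Int) ≤ ((t:Int)+1) * (iN:Int) := by
      have : (32:Int) ≤ (iN:Int) := by omega
      nlinarith
    have hk0 : (0:Int) ≤ (k:Int) := Int.natCast_nonneg k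
    simp [show (32:Int) - ((t:Int)+1) * (iN:Int) ≤ (k:Int) by linarith]
  | succ fuel ih =>
    intro iN hfuel value r hr hres hval
    rw [pvAloop]
    by_cases hcond : (iN:Int) * ((t:Int)+1) < 32
    · rw [if_pos hcond]
      have hst : (((t:Int)+1)).toNat = t + 1 := by omega
      have hb0 : (0:Int) ≤ ((t:Int)+1) * (iN:Int) := by positivity
      have hT1 : (0:Int) < (t:Int)+1 := by omega
      -- bits of part
      have hpart : ∀ k : Nat, (PySem.Int.band value
          ((((2:Int)^(t+1) - 1) <<< (((32:Int) - ((t:Int)+1)).toNat)) >>> ((((t:Int)+1) * (iN:Int)).toNat))).testBit k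
          = (decide ((32:Int) - ((t:Int)+1) * ((iN:Int)+1) ≤ (k:Int) ∧ (k:Int) < 32 - ((t:Int)+1) * (iN:Int)) && pvX y m t k) := by
        intro k
        rw [pv_tb_band, pv_partmask_tb t iN ht k]
        by_cases hk : (32:Int) - ((t:Int)+1) * ((iN:Int)+1) ≤ (k:Int) ∧ (k:Int) < 32 - ((t:Int)+1) * (iN:Int)
        · rw [hval k hk.2, if_pos hk.1]
          simp [hk]
        · rw [decide_eq_false hk]
          simp
      have e1 : ((t:Int)+1) * ((iN:Int)+1) = ((t:Int)+1) * (iN:Int) + ((t:Int)+1) := by ring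
      have hpm0 : (0:Int) ≤ (((2:Int)^(t+1) - 1) <<< (((32:Int) - ((t:Int)+1)).toNat)) >>> ((((t:Int)+1) * (iN:Int)).toNat) := by
        refine pv_shr_nonneg _ (pv_shl_nonneg _ ?_ _) _
        have : (1:Int) ≤ 2^(t+1) := one_le_pow₀ (by norm_num)
        omega
      have hr' : 0 ≤ PySem.Int.bor r (PySem.Int.band value
          ((((2:Int)^(t+1) - 1) <<< (((32:Int) - ((t:Int)+1)).toNat)) >>> ((((t:Int)+1) * (iN:Int)).toNat))) :=
        pv_bor_nonneg _ _ hr (pv_band_nonneg_right _ _ hpm0)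
      have hres' : ∀ k : Nat, (PySem.Int.bor r (PySem.Int.band value
          ((((2:Int)^(t+1) - 1) <<< (((32:Int) - ((t:Int)+1)).toNat)) >>> ((((t:Int)+1) * (iN:Int)).toNat)))).testBit k
          = (decide ((32:Int) - ((t:Int)+1) * (((iN+1:Nat)):Int) ≤ (k:Int)) && pvX y m t k) := by
        intro k
        rw [pv_tb_bor, hres k, hpart k]
        rw [show ((t:Int)+1) * (((iN+1:Nat)):Int) = ((t:Int)+1) * (iN:Int) + ((t:Int)+1) by push_cast; ring]
        cases hX : pvX y m t k
        · simp
        · simp only [Bool.and_true]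
          rw [← Bool.decide_or, decide_eq_decide]
          omega
      have hval' : ∀ k : Nat, (k:Int) < 32 - ((t:Int)+1) * (((iN+1:Nat)):Int) →
          (PySem.Int.bxor value (PySem.Int.band ((PySem.Int.band value
            ((((2:Int)^(t+1) - 1) <<< (((32:Int) - ((t:Int)+1)).toNat)) >>> ((((t:Int)+1) * (iN:Int)).toNat))) >>> (((t:Int)+1)).toNat) m)).testBit k
          = (if (32:Int) - ((t:Int)+1) * ((((iN+1:Nat)):Int)+1) ≤ (k:Int) then pvX y m t k else y.testBit k) := by
        intro k hk
        rw [show ((t:Int)+1) * ((((iN+1:Nat)):Int)+1) = ((t:Int)+1) * (iN:Int) + 2*((t:Int)+1) by push_cast; ring]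
        rw [show ((t:Int)+1) * (((iN+1:Nat)):Int) = ((t:Int)+1) * (iN:Int) + ((t:Int)+1) by push_cast; ring] at hk
        have hkA : (k:Int) < 32 - ((t:Int)+1) * (iN:Int) := by omega
        have hvk := hval k hkA
        rw [if_neg (by omega)] at hvk
        rw [pv_tb_bxor, pv_tb_band, pv_tb_shr, hst, hvk]
        have hidx : (t+1) + k = k + t + 1 := by omega
        rw [hidx, hpart (k + t + 1)]
        rw [show (((k + t + 1 : Nat)):Int) = (k:Int) + (t:Int) + 1 by push_cast; ring, e1]
        by_cases hlo : (32:Int) - (((t:Int)+1) * (iN:Int) + 2*((t:Int)+1)) ≤ (k:Int)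
        · rw [if_pos hlo, decide_eq_true (show (32:Int) - (((t:Int)+1) * (iN:Int) + ((t:Int)+1)) ≤ (k:Int) + (t:Int) + 1 ∧ (k:Int) + (t:Int) + 1 < 32 - ((t:Int)+1) * (iN:Int) by omega)]
          have h32 : k < 32 := by omega
          rw [pvX_low y m t k h32]
          cases y.testBit k <;> cases m.testBit k <;> cases pvX y m t (k + t + 1) <;> rfl
        · rw [if_neg hlo, decide_eq_false (show ¬((32:Int) - (((t:Int)+1) * (iN:Int) + ((t:Int)+1)) ≤ (k:Int) + (t:Int) + 1 ∧ (k:Int) + (t:Int) + 1 < 32 - ((t:Int)+1) * (iN:Int)) by omega)]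
          cases y.testBit k <;> rfl
      have H := ih (iN+1) (by omega) _ _ hr' hres' hval'
      rw [show (((iN+1:Nat)):Int) = (iN:Int) + 1 by push_cast; ring] at H
      exact H
    · rw [if_neg hcond]
      refine ⟨hr, fun k => ?_⟩
      rw [hres k]
      have hbig : (32:Int) ≤ ((t:Int)+1) * (iN:Int) := by rw [mul_comm]; exact not_lt.mp hcond
      have hk0 : (0:Int) ≤ (k:Int) := Int.natCast_nonneg k
      simp [show (32:Int) - ((t:Int)+1) * (iN:Int) ≤ (k:Int) by linarith]

theorem pv_main (value shift mask : Int) (h1 : 1 ≤ shift) (h2 : shift ≤ 32) :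
    unBitshiftRightXor value shift mask = unBitshiftRightXor_alt value shift mask := by
  set t : Nat := shift.toNat - 1 with htdef
  have hsht : shift = ((t:Int)) + 1 := by omega
  have ht : t + 1 ≤ 32 := by omega
  rw [hsht]
  unfold unBitshiftRightXor unBitshiftRightXor_alt
  rw [show (((t:Int)+1)).toNat = t+1 from by omega]
  have hres0 : ∀ k : Nat, (0:Int).testBit k
      = (decide ((32:Int) - ((t:Int)+1) * (((0:Nat)):Int) ≤ (k:Int)) && pvX value mask t k) := by
    intro k
    rw [pv_tb_zero]
    by_cases h32 : 32 ≤ k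
    · rw [pvX_high value mask t k h32]
      simp
    · rw [decide_eq_false (show ¬ ((32:Int) - ((t:Int)+1) * (((0:Nat)):Int) ≤ (k:Int)) by push_cast; omega)]
      simp
  have hval0 : ∀ k : Nat, (k:Int) < 32 - ((t:Int)+1) * (((0:Nat)):Int) →
      value.testBit k = (if (32:Int) - ((t:Int)+1) * ((((0:Nat)):Int)+1) ≤ (k:Int) then pvX value mask t k else value.testBit k) := by
    intro k hk
    by_cases hlo : (32:Int) - ((t:Int)+1) * ((((0:Nat)):Int)+1) ≤ (k:Int)
    · rw [if_pos hlo]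
      have h32 : k < 32 := by push_cast at hk; omega
      have hhigh : 32 ≤ k + t + 1 := by push_cast at hlo; omega
      rw [pvX_low value mask t k h32, pvX_high value mask t _ hhigh]
      cases value.testBit k <;> cases mask.testBit k <;> rfl
    · rw [if_neg hlo]
  have HA := pvA_inv value mask t ht 33 0 (by omega) value 0 le_rfl hres0 hval0
  have hresB : ∀ k : Nat, (0:Int).testBit k = (decide (32 ≤ k) && pvX value mask t k) := by
    intro k
    rw [pv_tb_zero]
    by_cases h32 : 32 ≤ k
    · rw [pvX_high value mask t k h32]
      simp
    · simp [h32]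
  have HB := pvB_inv value mask t 32 le_rfl 0 le_rfl hresB
  exact pv_eq_of_tb _ _ HA.1 HB.1 (fun k => (HA.2 k).trans (HB.2 k).symm)

-- ===== VERDICT (by name: the statement is the Claim_ definition above) =====
theorem unBitshiftRightXor_spec : Claim_equal_unBitshiftRightXor := by
  intro value shift mask _hdom hpre
  exact pv_main value shift mask hpre.1 hpre.2
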